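-- pv_equiv track=rewrite | github.com/NazaninShafiabadi/BLANC_repo | code/blanc.py | mask_sentence
-- ===== SOURCE A (Python) =====
-- def mask_sentence(sentence, mask_token, i, M, L_min):
--     return [
--         mask_token
--         if (j - i) % M == 0
--         and (
--             len(sentence[j]) >= L_min
--             or sentence[j].startswith("##")
--             or sentence[min(j + 1, len(sentence) - 1)].startswith("##")
--         )
--         else sentence[j]
--         for j in range(len(sentence))
--     ]
-- ===== SOURCE B (Python) =====
-- def mask_sentence(sentence, mask_token, i, M, L_min):
--     n = len(sentence)
--     if n == 0:
--         return []
--     step = abs(M)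
--     start = i % step
--     out = sentence[:start]
--     for k in range(start, n, step):
--         head = sentence[k]
--         nxt = sentence[k + 1] if k + 1 < n else head
--         out.append(mask_token
--                    if (len(head) >= L_min
--                        or head.startswith("##")
--                        or nxt.startswith("##"))
--                    else head)
--         out.extend(sentence[k + 1 : k + step])
--     return out
-- ===== Notes on version B (the rewrite author's own statement) =====
-- stated objective: alternative
-- what changed: B assembles the output from slices -- the untouched prefix sentence[:i%|M|], then for each stride position one possibly-masked element followed by the untouched gap slice up to the next stride position -- instead of A's single comprehension testing (j-i)%M==0 at every index.
import Mathlib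
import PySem

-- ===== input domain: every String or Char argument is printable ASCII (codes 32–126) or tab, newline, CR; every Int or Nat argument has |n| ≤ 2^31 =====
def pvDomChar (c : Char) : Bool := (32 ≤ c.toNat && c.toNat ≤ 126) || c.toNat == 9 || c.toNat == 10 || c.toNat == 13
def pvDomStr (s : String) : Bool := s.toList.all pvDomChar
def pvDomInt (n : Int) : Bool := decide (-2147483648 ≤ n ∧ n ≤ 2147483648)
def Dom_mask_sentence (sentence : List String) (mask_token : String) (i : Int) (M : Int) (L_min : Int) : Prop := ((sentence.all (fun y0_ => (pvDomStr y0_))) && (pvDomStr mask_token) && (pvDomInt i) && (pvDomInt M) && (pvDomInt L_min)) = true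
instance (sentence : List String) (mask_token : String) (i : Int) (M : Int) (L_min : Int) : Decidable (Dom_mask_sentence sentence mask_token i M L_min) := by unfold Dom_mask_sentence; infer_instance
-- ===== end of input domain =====

-- B assembles the output from slices: the untouched prefix sentence[:i%|M|], then per stride
-- position one (possibly masked) element followed by the untouched gap slice up to the next
-- stride position — instead of A's comprehension testing (j-i)%M==0 at every index
-- (objective: alternative, same cost class).

-- ===== PORT A =====
def mask_sentence (sentence : List String) (mask_token : String) (i : Int) (M : Int) (L_min : Int) : List String :=
  (PySem.List.pyRange 0 (PySem.List.len sentence) 1).map (fun j =>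
    if (PySem.Int.mod (j - i) M == 0)
        && (decide (L_min ≤ PySem.Str.len (PySem.List.pyGetD sentence j ""))
            || PySem.Str.startswith (PySem.List.pyGetD sentence j "") "##"
            || PySem.Str.startswith (PySem.List.pyGetD sentence (min (j + 1) (PySem.List.len sentence - 1)) "") "##")
    then mask_token else PySem.List.pyGetD sentence j "")

-- ===== PORT B =====
def mask_sentence_alt (sentence : List String) (mask_token : String) (i : Int) (M : Int) (L_min : Int) : List String :=
  let n := PySem.List.len sentence
  if n = 0 then []
  else
    let step := |M|
    let start := PySem.Int.mod i step
    (PySem.List.pyRange start n step).foldl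
      (fun out k =>
        let head := PySem.List.pyGetD sentence k ""
        let nxt := if k + 1 < n then PySem.List.pyGetD sentence (k + 1) "" else head
        (out ++ [if decide (L_min ≤ PySem.Str.len head)
                  || PySem.Str.startswith head "##"
                  || PySem.Str.startswith nxt "##"
                 then mask_token else head])
          ++ PySem.List.slice sentence (some (k + 1)) (some (k + step)))
      (PySem.List.slice sentence none (some start))

-- ===== PRECONDITION & SPEC =====
-- Pre_ excludes exactly the inputs where A raises ZeroDivisionError ((j-i) % 0 with a
-- nonempty list); B raises the same exception there.
def Pre_mask_sentence (sentence : List String) (mask_token : String) (i : Int) (M : Int) (L_min : Int) : Prop :=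
  sentence = [] ∨ M ≠ 0
instance (sentence : List String) (mask_token : String) (i : Int) (M : Int) (L_min : Int) : Decidable (Pre_mask_sentence sentence mask_token i M L_min) := by unfold Pre_mask_sentence; infer_instance

def pvWitness_mask_sentence : List String × String × Int × Int × Int :=
  (["hello", "##x", "ab"], "[MASK]", 0, 2, 4)

def Spec_mask_sentence (sentence : List String) (mask_token : String) (i : Int) (M : Int) (L_min : Int) (out : List String) : Prop := out = mask_sentence_alt sentence mask_token i M L_min
instance (sentence : List String) (mask_token : String) (i : Int) (M : Int) (L_min : Int) (out : List String) : Decidable (Spec_mask_sentence sentence mask_token i M L_min out) := by unfold Spec_mask_sentence; infer_instance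

-- ===== CLAIM (what is proved, stated in full; the proofs are below) =====
def Claim_equal_mask_sentence : Prop := ∀ (sentence : List String) (mask_token : String) (i : Int) (M : Int) (L_min : Int), Dom_mask_sentence sentence mask_token i M L_min → Pre_mask_sentence sentence mask_token i M L_min → Spec_mask_sentence sentence mask_token i M L_min (mask_sentence sentence mask_token i M L_min)

-- ===== LEMMAS AND PROOFS =====

-- A's per-index element (abbreviation for the proofs; mask_sentence is literally its map)
def pvF (sentence : List String) (mask_token : String) (i M L_min : Int) (j : Int) : String :=
  if (PySem.Int.mod (j - i) M == 0)
      && (decide (L_min ≤ PySem.Str.len (PySem.List.pyGetD sentence j ""))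
          || PySem.Str.startswith (PySem.List.pyGetD sentence j "") "##"
          || PySem.Str.startswith (PySem.List.pyGetD sentence (min (j + 1) (PySem.List.len sentence - 1)) "") "##")
  then mask_token else PySem.List.pyGetD sentence j ""

theorem pvA_eq (sentence : List String) (mask_token : String) (i M L_min : Int) :
    mask_sentence sentence mask_token i M L_min =
      (PySem.List.pyRange 0 (PySem.List.len sentence) 1).map (pvF sentence mask_token i M L_min) := rfl

-- cons form of pyRange for an arbitrary positive step
theorem pvRange_cons (a b s : Int) (hs : 0 < s) (hab : a < b) :
    PySem.List.pyRange a b s = a :: PySem.List.pyRange (a + s) b s := by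
  rw [PySem.List.pyRange_of_pos a b hs, PySem.List.pyRange_of_pos (a + s) b hs]
  have hdiv : (b - a + s - 1) / s = (b - a - 1) / s + 1 := by
    have h := Int.add_mul_ediv_right (b - a - 1) 1 (by omega : s ≠ 0)
    have : b - a + s - 1 = b - a - 1 + 1 * s := by ring
    rw [this, h]
  have hq0 : 0 ≤ (b - a - 1) / s := Int.ediv_nonneg (by omega) (by omega)
  rw [if_pos hab, hdiv]
  have htn : ((b - a - 1) / s + 1).toNat = ((b - a - 1) / s).toNat + 1 := by omega
  rw [htn, List.range_succ_eq_map, List.map_cons, List.map_map]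
  congr 1
  · ring
  · by_cases hab2 : a + s < b
    · rw [if_pos hab2]
      have : b - (a + s) + s - 1 = b - a - 1 := by ring
      rw [this]
      apply List.map_congr_left
      intro x _
      simp [Nat.succ_eq_add_one]
      ring
    · rw [if_neg hab2]
      have hlt : b - a - 1 < s := by omega
      have : (b - a - 1) / s = 0 := Int.ediv_eq_zero_of_lt (by omega) hlt
      simp [this]

theorem pvRange_nil (a b s : Int) (hs : 0 < s) (hab : b ≤ a) :
    PySem.List.pyRange a b s = [] := by
  rw [PySem.List.pyRange_of_pos a b hs, if_neg (by omega)]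
  simp

-- a slice is the map of plain lookups over its index range
theorem pvSlice_eq_map (sentence : List String) (a m : Int) (h0 : 0 ≤ a) (ham : a ≤ m)
    (hm : m ≤ (sentence.length : Int)) :
    PySem.List.slice sentence (some a) (some m) =
      (PySem.List.pyRange a m 1).map (fun j => PySem.List.pyGetD sentence j "") := by
  have hsplit := PySem.List.pyRange_one_append a m (sentence.length : Int) ham hm
  have hfull : (PySem.List.pyRange a (sentence.length : Int) 1).map
      (fun j => PySem.List.pyGetD sentence j "") = sentence.drop a.toNat := by
    have := PySem.List.map_pyGetD_pyRange' (xs := sentence) (d := "") (a := a) h0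
    exact this
  have hrest : (PySem.List.pyRange m (sentence.length : Int) 1).map
      (fun j => PySem.List.pyGetD sentence j "") = sentence.drop m.toNat := by
    have := PySem.List.map_pyGetD_pyRange' (xs := sentence) (d := "") (a := m) (le_trans h0 ham)
    exact this
  have hdrop : sentence.drop a.toNat =
      (PySem.List.pyRange a m 1).map (fun j => PySem.List.pyGetD sentence j "") ++
        sentence.drop m.toNat := by
    rw [← hfull, hsplit, List.map_append, hrest]
  rw [PySem.List.slice_toNat sentence h0 (le_trans h0 ham), hdrop]
  have hlen : ((PySem.List.pyRange a m 1).map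
      (fun j => PySem.List.pyGetD sentence j "")).length = m.toNat - a.toNat := by
    rw [List.length_map, PySem.List.length_pyRange_one]
    omega
  rw [← hlen, List.take_left]

-- unmasked indices: if j is strictly between two consecutive stride positions, A keeps sentence[j]
theorem pvF_unmasked (sentence : List String) (mask_token : String) (i M L_min : Int)
    (hM : M ≠ 0) (j k : Int) (hd : |M| ∣ (k - i)) (hlo : k < j) (hhi : j < k + |M|) :
    pvF sentence mask_token i M L_min j = PySem.List.pyGetD sentence j "" := by
  have hnot : ¬ (M ∣ (j - i)) := by
    intro h
    have h1 : |M| ∣ (j - i) := (abs_dvd M (j - i)).mpr h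
    have h2 : |M| ∣ (j - k) := by
      have : j - k = (j - i) - (k - i) := by ring
      rw [this]; exact dvd_sub h1 hd
    rcases h2 with ⟨q, hq⟩
    have hs : 0 < |M| := abs_pos.mpr hM
    by_cases hq0 : q ≤ 0
    · nlinarith
    · have : 1 ≤ q := by omega
      nlinarith
  unfold pvF
  rw [if_neg]
  intro h
  rw [Bool.and_eq_true] at h
  have := of_decide_eq_true (by simpa using h.1)
  exact hnot ((PySem.Int.mod_eq_zero_iff_dvd _ _).mp this)

-- B's loop, from any stride-aligned k, appends exactly A's remaining output
theorem pvLoop (sentence : List String) (mask_token : String) (i M L_min : Int) (hM : M ≠ 0) :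
    ∀ fuel : Nat, ∀ k : Int, ((sentence.length : Int) - k).toNat ≤ fuel → 0 ≤ k →
      |M| ∣ (k - i) → ∀ acc : List String,
      (PySem.List.pyRange k (sentence.length : Int) |M|).foldl
        (fun out k =>
          (out ++ [if decide (L_min ≤ PySem.Str.len (PySem.List.pyGetD sentence k ""))
                    || PySem.Str.startswith (PySem.List.pyGetD sentence k "") "##"
                    || PySem.Str.startswith (if k + 1 < (sentence.length : Int)
                        then PySem.List.pyGetD sentence (k + 1) ""
                        else PySem.List.pyGetD sentence k "") "##"
                   then mask_token else PySem.List.pyGetD sentence k ""])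
            ++ PySem.List.slice sentence (some (k + 1)) (some (k + |M|))) acc =
      acc ++ (PySem.List.pyRange k (sentence.length : Int) 1).map (pvF sentence mask_token i M L_min) := by
  intro fuel
  induction fuel with
  | zero =>
      intro k hfuel h0 hd acc
      have hkn : (sentence.length : Int) ≤ k := by omega
      rw [pvRange_nil _ _ _ (abs_pos.mpr hM) hkn, PySem.List.pyRange_one_eq_nil hkn]
      simp
  | succ fuel ih =>
      intro k hfuel h0 hd acc
      set n : Int := (sentence.length : Int) with hn
      by_cases hkn : n ≤ k
      · rw [pvRange_nil _ _ _ (abs_pos.mpr hM) hkn, PySem.List.pyRange_one_eq_nil hkn]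
        simp
      · push_neg at hkn
        have hs : 0 < |M| := abs_pos.mpr hM
        set s : Int := |M| with hsdef
        rw [pvRange_cons _ _ _ hs hkn]
        simp only [List.foldl_cons]
        rw [ih (k + s) (by omega) (by omega)
          (by have : k + s - i = (k - i) + s := by ring
              rw [this]; exact dvd_add hd (dvd_refl _))]
        set m : Int := min (k + s) n with hm
        -- the appended element is pvF k
        have hhead : (if decide (L_min ≤ PySem.Str.len (PySem.List.pyGetD sentence k ""))
              || PySem.Str.startswith (PySem.List.pyGetD sentence k "") "##"
              || PySem.Str.startswith (if k + 1 < n then PySem.List.pyGetD sentence (k + 1) ""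
                  else PySem.List.pyGetD sentence k "") "##"
            then mask_token else PySem.List.pyGetD sentence k "") =
            pvF sentence mask_token i M L_min k := by
          unfold pvF
          have hmodz : (PySem.Int.mod (k - i) M == 0) = true := by
            simp [PySem.Int.mod_eq_zero_iff_dvd]
            exact (abs_dvd M (k - i)).mp hd
          rw [hmodz, Bool.true_and]
          have hnbr : (if k + 1 < n then PySem.List.pyGetD sentence (k + 1) ""
              else PySem.List.pyGetD sentence k "") =
              PySem.List.pyGetD sentence (min (k + 1) (PySem.List.len sentence - 1)) "" := by
            rw [PySem.List.len_eq]
            by_cases hk1 : k + 1 < n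
            · rw [if_pos hk1, min_eq_left (by omega)]
            · rw [if_neg hk1, min_eq_right (by omega)]
              congr 1
              omega
          rw [hnbr]
        -- the gap slice is the map of pvF over (k, m)
        have hgap : PySem.List.slice sentence (some (k + 1)) (some (k + s)) =
            (PySem.List.pyRange (k + 1) m 1).map (pvF sentence mask_token i M L_min) := by
          have h1 : PySem.List.slice sentence (some (k + 1)) (some (k + s)) =
              PySem.List.slice sentence (some (k + 1)) (some m) := by
            by_cases h : k + s ≤ n
            · rw [hm, min_eq_left h]
            · rw [PySem.List.slice_toNat sentence (by omega) (by omega),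
                PySem.List.slice_toNat sentence (by omega) (by omega),
                List.take_of_length_le (by rw [List.length_drop]; omega),
                List.take_of_length_le (by rw [List.length_drop]; omega)]
          rw [h1, pvSlice_eq_map sentence (k + 1) m (by omega) (by omega) (by omega)]
          apply List.map_congr_left
          intro j hj
          rw [PySem.List.mem_pyRange_one] at hj
          exact (pvF_unmasked sentence mask_token i M L_min hM j k hd (by omega) (by omega)).symm
        -- reassemble: pvF k :: gap ++ rest = map pvF (pyRange k n 1)
        have hsplit : PySem.List.pyRange k n 1 =
            (k :: PySem.List.pyRange (k + 1) m 1) ++ PySem.List.pyRange (k + s) n 1 := by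
          have h2 : PySem.List.pyRange m n 1 = PySem.List.pyRange (k + s) n 1 := by
            by_cases h : k + s ≤ n
            · rw [hm, min_eq_left h]
            · rw [hm, min_eq_right (by omega), PySem.List.pyRange_one_eq_nil (le_refl n),
                PySem.List.pyRange_one_eq_nil (by omega)]
          rw [← PySem.List.pyRange_one_cons (by omega : k < m), ← h2,
            ← PySem.List.pyRange_one_append k m n (by omega) (by omega)]
        rw [hhead, hgap, hsplit, List.map_append, List.map_cons]
        simp

-- B, on a nonempty list, is the let-free fold pvLoop speaks about
theorem pvB_eq (sentence : List String) (mask_token : String) (i M L_min : Int)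
    (hnil : sentence ≠ []) :
    mask_sentence_alt sentence mask_token i M L_min =
      (PySem.List.pyRange (PySem.Int.mod i |M|) (sentence.length : Int) |M|).foldl
        (fun out k =>
          (out ++ [if decide (L_min ≤ PySem.Str.len (PySem.List.pyGetD sentence k ""))
                    || PySem.Str.startswith (PySem.List.pyGetD sentence k "") "##"
                    || PySem.Str.startswith (if k + 1 < (sentence.length : Int)
                        then PySem.List.pyGetD sentence (k + 1) ""
                        else PySem.List.pyGetD sentence k "") "##"
                   then mask_token else PySem.List.pyGetD sentence k ""])
            ++ PySem.List.slice sentence (some (k + 1)) (some (k + |M|)))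
        (PySem.List.slice sentence none (some (PySem.Int.mod i |M|))) := by
  have hn : 0 < sentence.length := List.length_pos_iff.mpr hnil
  simp only [mask_sentence_alt, PySem.List.len_eq]
  rw [if_neg (by omega : ¬ ((sentence.length : Int) = 0))]
  rfl

theorem pv_main (sentence : List String) (mask_token : String) (i M L_min : Int)
    (hPre : Pre_mask_sentence sentence mask_token i M L_min) :
    mask_sentence sentence mask_token i M L_min = mask_sentence_alt sentence mask_token i M L_min := by
  by_cases hnil : sentence = []
  · subst hnil
    simp [mask_sentence, mask_sentence_alt, PySem.List.len_eq,
      PySem.List.pyRange_one_eq_nil (le_refl (0 : Int))]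
  · have hM : M ≠ 0 := by
      rcases hPre with h | h
      · exact absurd h hnil
      · exact h
    have hn : 0 < sentence.length := List.length_pos_iff.mpr hnil
    have hsabs : 0 < |M| := abs_pos.mpr hM
    have h0' : 0 ≤ PySem.Int.mod i |M| := PySem.Int.mod_nonneg i hsabs
    have hdvd' : |M| ∣ (PySem.Int.mod i |M| - i) := by
      refine ⟨-(PySem.Int.floordiv i |M|), ?_⟩
      linarith [PySem.Int.floordiv_mul_add_mod i |M|, mul_comm (PySem.Int.floordiv i |M|) |M|]
    rw [pvA_eq, PySem.List.len_eq, pvB_eq sentence mask_token i M L_min hnil,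
      pvLoop sentence mask_token i M L_min hM
        (((sentence.length : Int)) - PySem.Int.mod i |M|).toNat (PySem.Int.mod i |M|)
        (le_refl _) h0' hdvd']
    set n : Int := (sentence.length : Int) with hndef
    set s : Int := |M| with hsdef
    set start : Int := PySem.Int.mod i s with hstart
    have hs : 0 < s := hsabs
    have h0 : 0 ≤ start := h0'
    have hlt : start < s := PySem.Int.mod_lt i hs
    have hdvd : s ∣ (start - i) := hdvd'
    set m : Int := min start n with hm
    have htake : PySem.List.slice sentence none (some start) =
        (PySem.List.pyRange 0 m 1).map (pvF sentence mask_token i M L_min) := by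
      have h1 : PySem.List.slice sentence none (some start) =
          PySem.List.slice sentence (some 0) (some m) := by
        rw [PySem.List.slice_to sentence h0, PySem.List.slice_toNat sentence (le_refl 0) (by omega)]
        simp only [Int.toNat_zero, List.drop_zero, Nat.sub_zero]
        by_cases h : start ≤ n
        · rw [hm, min_eq_left h]
        · rw [hm, min_eq_right (by omega)]
          rw [List.take_of_length_le (by omega), List.take_of_length_le (by omega)]
      rw [h1, pvSlice_eq_map sentence 0 m (le_refl 0) (by omega) (by omega)]
      apply List.map_congr_left
      intro j hj
      rw [PySem.List.mem_pyRange_one] at hj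
      exact (pvF_unmasked sentence mask_token i M L_min hM j (start - s)
        (by rcases hdvd with ⟨q, hq⟩; exact ⟨q - 1, by linarith [hq]⟩) (by omega) (by omega)).symm
    have hrange : PySem.List.pyRange start n 1 = PySem.List.pyRange m n 1 := by
      by_cases h : start ≤ n
      · rw [hm, min_eq_left h]
      · rw [hm, min_eq_right (by omega), PySem.List.pyRange_one_eq_nil (by omega),
          PySem.List.pyRange_one_eq_nil (le_refl n)]
    rw [htake, hrange, ← List.map_append, ← PySem.List.pyRange_one_append 0 m n (by omega) (by omega)]

-- ===== VERDICT (by name: the statement is the Claim_ definition above) =====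
theorem mask_sentence_spec : Claim_equal_mask_sentence := by
  intro sentence mask_token i M L_min _ hPre
  exact pv_main sentence mask_token i M L_min hPre
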